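-- pv_equiv track=rewrite | github.com/bvannah/Crypto-Projects | RepeatingKeyXOR.py | getSplitBlocks
-- ===== SOURCE A (Python) =====
-- def getSplitBlocks(fileString, keySize):
--     ret =[]
--     for i in range(keySize):
--         block=[] #the block for the ith characters
--         charIndex=i #start with the first ith character
--         while(charIndex<len(fileString)): #until the end of the whole string
--             block.append(fileString[charIndex])
--             charIndex+=keySize
--         ret.append(block) #add the block of ith characters to the total blocks
--
--
--     return ret
-- ===== SOURCE B (Python) =====
-- def getSplitBlocks(fileString, keySize):
--     if keySize <= 0:
--         return []
--     ret = [[] for _ in range(keySize)]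
--     for idx, ch in enumerate(fileString):
--         ret[idx % keySize].append(ch)
--     return ret
-- ===== Notes on version B (the rewrite author's own statement) =====
-- stated objective: alternative
-- what changed: Replaced A's per-residue strided scans (one pass over the string for each of the keySize blocks) by a single enumerate pass that scatters each character into bucket idx % keySize of a pre-built list of keySize empty blocks.
import Mathlib
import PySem

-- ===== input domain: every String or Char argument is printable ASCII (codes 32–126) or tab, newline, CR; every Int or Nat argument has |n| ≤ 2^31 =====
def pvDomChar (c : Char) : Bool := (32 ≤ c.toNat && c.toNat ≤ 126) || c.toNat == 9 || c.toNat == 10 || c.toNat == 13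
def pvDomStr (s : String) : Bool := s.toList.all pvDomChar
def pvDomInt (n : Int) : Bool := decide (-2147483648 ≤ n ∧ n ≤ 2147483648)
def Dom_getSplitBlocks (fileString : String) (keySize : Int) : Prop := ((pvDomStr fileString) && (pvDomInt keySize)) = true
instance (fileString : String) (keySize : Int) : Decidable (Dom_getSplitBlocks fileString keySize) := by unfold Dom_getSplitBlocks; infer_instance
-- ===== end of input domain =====

-- B replaces A's keySize strided scans by ONE enumerate pass scattering each character into
-- bucket idx % keySize (a single traversal instead of one per block); return values proved equal.


-- ===== PORT A =====
-- the inner `while charIndex < len(fileString)` loop; fuel only bounds the iterations (the loop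
-- body only ever runs with keySize ≥ 1, so fileString.length iterations suffice); the guard
-- itself is the Python guard unchanged
def pvInnerA (chars : List Char) (keySize : Int) (charIndex : Int) (block : List String)
    (fuel : Nat) : List String :=
  match fuel with
  | 0 => block
  | fuel + 1 =>
    if charIndex < (chars.length : Int) then
      pvInnerA chars keySize (charIndex + keySize)
        (block ++ [((PySem.List.pyGet? chars charIndex).map
                      (fun c => String.ofList [c])).getD ""]) fuel
    else block

def getSplitBlocks (fileString : String) (keySize : Int) : List (List String) :=
  (PySem.List.pyRange 0 keySize 1).foldl
    (fun ret i => ret ++ [pvInnerA fileString.toList keySize i [] fileString.toList.length])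
    []

-- ===== PORT B =====
def getSplitBlocks_alt (fileString : String) (keySize : Int) : List (List String) :=
  if keySize ≤ 0 then []
  else
    (PySem.List.enumerate fileString.toList).foldl
      (fun ret p => ret.modify (PySem.Int.mod p.1 keySize).toNat
        (fun b => b ++ [String.ofList [p.2]]))
      (List.replicate keySize.toNat [])

-- ===== PRECONDITION & SPEC =====
def Spec_getSplitBlocks (fileString : String) (keySize : Int) (out : List (List String)) : Prop := out = getSplitBlocks_alt fileString keySize
instance (fileString : String) (keySize : Int) (out : List (List String)) : Decidable (Spec_getSplitBlocks fileString keySize out) := by unfold Spec_getSplitBlocks; infer_instance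

-- ===== CLAIM (what is proved, stated in full; the proofs are below) =====
def Claim_equal_getSplitBlocks : Prop := ∀ (fileString : String) (keySize : Int), Dom_getSplitBlocks fileString keySize → Spec_getSplitBlocks fileString keySize (getSplitBlocks fileString keySize)

-- ===== LEMMAS AND PROOFS =====

-- specification device: the characters of `cs` at offsets d, d+k, d+2k, … as 1-char strings
def pvBucket (k : Nat) : List Char → Nat → List String
  | [], _ => []
  | c :: cs, 0 => String.ofList [c] :: pvBucket k cs (k - 1)
  | _ :: cs, d + 1 => pvBucket k cs d

theorem pvBucket_skip (k : Nat) : ∀ (d : Nat) (cs : List Char),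
    pvBucket k cs d = pvBucket k (cs.drop d) 0 := by
  intro d
  induction d with
  | zero => intro cs; simp
  | succ d ih =>
    intro cs
    cases cs with
    | nil => simp [pvBucket]
    | cons c cs => simpa [pvBucket] using ih cs

-- A's inner loop computes the bucket of stride-k offsets starting at i
theorem pvInnerA_eq_bucket (chars : List Char) (k : Nat) (_hk : 0 < k) :
    ∀ (fuel : Nat) (i : Nat) (block : List String), chars.length - i ≤ fuel →
      pvInnerA chars (k : Int) (i : Int) block fuel
        = block ++ pvBucket k (chars.drop i) 0 := by
  intro fuel
  induction fuel with
  | zero =>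
    intro i block hf
    have hle : chars.length ≤ i := by omega
    simp [pvInnerA, List.drop_eq_nil_of_le hle, pvBucket]
  | succ fuel ih =>
    intro i block hf
    by_cases hi : i < chars.length
    · have hcast : (i : Int) < (chars.length : Int) := by exact_mod_cast hi
      have hstep : ((i : Int) + (k : Int)) = ((i + k : Nat) : Int) := by push_cast; ring
      have hrec := ih (i + k) (block ++ [String.ofList [chars[i]]]) (by omega)
      have hdrop : chars.drop i = chars[i] :: chars.drop (i + 1) :=
        List.drop_eq_getElem_cons hi
      have hget : PySem.List.pyGet? chars (i : Int) = some chars[i] := by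
        simp [PySem.List.pyGet?_natCast, List.getElem?_eq_getElem hi]
      rw [pvInnerA, if_pos hcast, hget, hstep]
      simp only [Option.map_some, Option.getD_some]
      rw [hrec, hdrop]
      have : pvBucket k (chars.drop (i + 1)) (k - 1)
          = pvBucket k (chars.drop (i + k)) 0 := by
        rw [pvBucket_skip, List.drop_drop]
        congr 2
        omega
      simp [pvBucket, this]
    · have hcast : ¬ (i : Int) < (chars.length : Int) := by exact_mod_cast hi
      rw [pvInnerA, if_neg hcast]
      rw [List.drop_eq_nil_of_le (by omega), pvBucket]
      simp

-- x % k for x < 2k, as an omega-friendly conditional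
theorem pvMod2 (x k : Nat) (_hk : 0 < k) (h : x < 2 * k) :
    x % k = if x < k then x else x - k := by
  split_ifs with hx
  · exact Nat.mod_eq_of_lt hx
  · rw [Nat.mod_eq_sub_mod (by omega)]
    exact Nat.mod_eq_of_lt (by omega)

theorem pvSuccMod (j k : Nat) : (j + 1) % k = (j % k + 1) % k := by
  conv_lhs => rw [Nat.add_mod]
  rw [Nat.add_mod (j % k) 1]
  rw [Nat.mod_mod_of_dvd j (dvd_refl k)]

-- the pure counting core of B's fold: m is the running index modulo k
def pvGo (k : Nat) : List Char → Nat → List (List String) → List (List String)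
  | [], _, acc => acc
  | c :: cs, m, acc =>
    pvGo k cs ((m + 1) % k) (acc.modify m (fun b => b ++ [String.ofList [c]]))

-- B's foldl over enumerate equals pvGo driven by j % k
theorem pvFold_eq_go (k : Nat) (_hk : 0 < k) :
    ∀ (cs : List Char) (j : Nat) (acc : List (List String)),
      (PySem.List.enumerate cs (j : Int)).foldl
        (fun ret p => ret.modify (PySem.Int.mod p.1 (k : Int)).toNat
          (fun b => b ++ [String.ofList [p.2]])) acc
      = pvGo k cs (j % k) acc := by
  intro cs
  induction cs with
  | nil => intro j acc; simp [PySem.List.enumerate_nil, pvGo]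
  | cons c cs ih =>
    intro j acc
    rw [PySem.List.enumerate_cons]
    have hmod : (PySem.Int.mod (j : Int) (k : Int)).toNat = j % k := by
      rw [PySem.Int.mod_natCast]
      exact Int.toNat_natCast _
    have hj1 : ((j : Int) + 1) = ((j + 1 : Nat) : Int) := by push_cast; ring
    simp only [List.foldl_cons, hmod, hj1]
    rw [ih (j + 1)]
    conv_rhs => rw [pvGo]
    rw [pvSuccMod]

-- invariant of pvGo: bucket r of the result is acc[r] followed by the characters at the
-- positions congruent to r, whose first offset is (r + k - m) % k
theorem pvGo_eq_map (k : Nat) (hk : 0 < k) :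
    ∀ (cs : List Char) (m : Nat) (acc : List (List String)),
      m < k → acc.length = k →
      pvGo k cs m acc
        = (List.range k).map (fun r => acc.getD r [] ++ pvBucket k cs ((r + k - m) % k)) := by
  intro cs
  induction cs with
  | nil =>
    intro m acc hm hlen
    apply List.ext_getElem (by simp [pvGo, hlen])
    intro r h1 h2
    have hr : r < k := by simpa using h2
    simp [pvGo, pvBucket, List.getD_eq_getElem?_getD,
      List.getElem?_eq_getElem (show r < acc.length by omega)]
  | cons c cs ih =>
    intro m acc hm hlen
    rw [pvGo, ih ((m + 1) % k) _ (Nat.mod_lt _ hk) (by simp [hlen])]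
    apply List.ext_getElem (by simp)
    intro r h1 h2
    have hr : r < k := by simpa using h1
    simp only [List.getElem_map, List.getElem_range]
    have hacc : (acc.modify m (fun b => b ++ [String.ofList [c]])).getD r []
        = if m = r then acc.getD r [] ++ [String.ofList [c]] else acc.getD r [] := by
      simp [List.getD_eq_getElem?_getD, List.getElem?_modify,
        List.getElem?_eq_getElem (show r < acc.length by omega)]
    by_cases hmr : m = r
    · subst hmr
      have h0 : (m + k - m) % k = 0 := by
        have : m + k - m = k := by omega
        simp [this]
      have hnext : (m + k - (m + 1) % k) % k = k - 1 := by
        rcases Nat.lt_or_ge (m + 1) k with h | h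
        · rw [Nat.mod_eq_of_lt h, pvMod2 _ _ hk (by omega)]
          split_ifs <;> omega
        · have hm1 : m + 1 = k := by omega
          have h10 : (m + 1) % k = 0 := by simp [hm1]
          rw [h10, pvMod2 _ _ hk (by omega)]
          split_ifs <;> omega
      rw [hacc, if_pos rfl, h0, hnext, pvBucket]
      simp
    · have hpos : 0 < (r + k - m) % k := by
        rw [pvMod2 _ _ hk (by omega)]; split_ifs <;> omega
      have hnext : (r + k - (m + 1) % k) % k = (r + k - m) % k - 1 := by
        rcases Nat.lt_or_ge (m + 1) k with h | h
        · rw [Nat.mod_eq_of_lt h, pvMod2 _ _ hk (by omega), pvMod2 _ _ hk (by omega)]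
          split_ifs <;> omega
        · have hm1 : m + 1 = k := by omega
          have h10 : (m + 1) % k = 0 := by simp [hm1]
          rw [h10, pvMod2 _ _ hk (by omega), pvMod2 _ _ hk (by omega)]
          split_ifs <;> omega
      rw [hacc, if_neg hmr, hnext]
      obtain ⟨d, hdod⟩ : ∃ d, (r + k - m) % k = d + 1 :=
        ⟨(r + k - m) % k - 1, by omega⟩
      rw [hdod]
      simp [pvBucket]

-- an append-singleton foldl is a map
theorem pvFoldl_append_singleton {α β : Type} (f : α → β) :
    ∀ (l : List α) (acc : List β),
      l.foldl (fun r i => r ++ [f i]) acc = acc ++ l.map f := by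
  intro l
  induction l with
  | nil => simp
  | cons x xs ih => intro acc; simp [ih]

-- ===== VERDICT (by name: the statement is the Claim_ definition above) =====
theorem getSplitBlocks_spec : Claim_equal_getSplitBlocks := by
  unfold Claim_equal_getSplitBlocks
  intro fileString keySize _
  unfold Spec_getSplitBlocks getSplitBlocks getSplitBlocks_alt
  by_cases hks : keySize ≤ 0
  · rw [if_pos hks, PySem.List.pyRange_one_eq_nil hks]
    rfl
  · rw [if_neg hks]
    obtain ⟨k, hk0, rfl⟩ : ∃ k : Nat, 0 < k ∧ keySize = (k : Int) :=
      ⟨keySize.toNat, by omega, by omega⟩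
    rw [PySem.List.pyRange_one, pvFoldl_append_singleton]
    have hB := pvFold_eq_go k hk0 fileString.toList 0 (List.replicate k [])
    norm_num at hB
    simp only [Int.toNat_natCast]
    rw [hB, pvGo_eq_map k hk0 fileString.toList 0 (List.replicate k []) hk0 (by simp)]
    simp only [List.nil_append, List.map_map, sub_zero, Int.toNat_natCast]
    apply List.map_congr_left
    intro r hr
    have hrk : r < k := by simpa using hr
    have hrepl : (List.replicate k ([] : List String)).getD r [] = [] := by
      simp [List.getD_eq_getElem?_getD, hrk]
    have hmod : (r + k - 0) % k = r := by
      rw [pvMod2 _ _ hk0 (by omega)]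
      split_ifs <;> omega
    simp only [Function.comp_apply, zero_add, hrepl, hmod, List.nil_append]
    rw [pvInnerA_eq_bucket fileString.toList k hk0 fileString.toList.length r []
          (by omega), pvBucket_skip k r fileString.toList]
    simp
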